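-- pv_equiv track=rewrite | github.com/devolt-dev-team/devolt-judgment-worker | sandbox/python3/src/app.py | parse_python_compile_error_message
-- ===== SOURCE A (Python) =====
-- def parse_python_compile_error_message(stderr: str):
--     lines = stderr.split("\n")
--     error_message = None
--     for i, line in enumerate(lines):
--         if "py_compile.PyCompileError:" in line:
--             # "py_compile.PyCompileError:" 이후 첫 번째 공백이 아닌 문자 찾기
--             extracted_message_in_curr_line = line.split("py_compile.PyCompileError:", 1)[1].strip()
--             if extracted_message_in_curr_line:
--                 error_message = extracted_message_in_curr_line + "\n" + "\n".join(lines[i + 1:]).strip()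
--             else:
--                 error_message = "\n".join(lines[i + 1:]).strip()
--             break
--
--     return error_message
-- ===== SOURCE B (Python) =====
-- def parse_python_compile_error_message(stderr: str):
--     marker = "py_compile.PyCompileError:"
--     idx = stderr.find(marker)
--     if idx == -1:
--         return None
--     head, _, rest = stderr[idx + len(marker):].partition("\n")
--     extracted = head.strip()
--     tail = rest.strip()
--     return extracted + "\n" + tail if extracted else tail
-- ===== Notes on version B (the rewrite author's own statement) =====
-- stated objective: simpler
-- what changed: B drops the split-into-lines + enumerate loop entirely: it locates the marker once with str.find on the whole string, slices off everything after it and partitions that remainder once on the first newline, so no line list is built and no loop runs.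
import Mathlib
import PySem

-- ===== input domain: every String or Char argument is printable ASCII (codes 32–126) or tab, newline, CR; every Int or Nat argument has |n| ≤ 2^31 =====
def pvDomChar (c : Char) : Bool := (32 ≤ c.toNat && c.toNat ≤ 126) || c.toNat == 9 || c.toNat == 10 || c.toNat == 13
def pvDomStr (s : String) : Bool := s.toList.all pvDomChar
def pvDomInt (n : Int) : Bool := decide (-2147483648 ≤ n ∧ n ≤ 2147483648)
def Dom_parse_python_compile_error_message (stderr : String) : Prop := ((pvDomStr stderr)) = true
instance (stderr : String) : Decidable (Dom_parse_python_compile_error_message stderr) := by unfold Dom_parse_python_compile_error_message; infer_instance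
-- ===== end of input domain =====

-- B replaces A's split-into-lines + enumerate loop by a single whole-string find of the marker
-- and one partition of the remainder on the first newline (objective: simpler; same result).

-- ===== PORT A =====
-- A's for-loop with break over enumerate(lines): structural recursion over the line list;
-- the Python's `lines[i + 1:]` is exactly the `rest` of the current recursion step.
def pvLoopA (lines : List String) : Option String :=
  match lines with
  | [] => none
  | line :: rest =>
    if PySem.Str.isIn "py_compile.PyCompileError:" line then
      -- line.split("py_compile.PyCompileError:", 1)[1]: the [1] index always exists here
      -- (the marker occurs in `line`), so the `.getD` defaults are never taken.
      let parts := (PySem.Str.splitMax? line "py_compile.PyCompileError:" 1).getD []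
      let extracted := PySem.Str.strip ((PySem.List.pyGet? parts 1).getD "")
      let tail := PySem.Str.strip (PySem.Str.join "\n" rest)
      some (if extracted ≠ "" then extracted ++ "\n" ++ tail else tail)
    else pvLoopA rest

def parse_python_compile_error_message (stderr : String) : Option String :=
  let lines := (PySem.Str.split? stderr "\n").getD []   -- sep "\n" ≠ "": never none
  pvLoopA lines

-- ===== PORT B =====
def parse_python_compile_error_message_alt (stderr : String) : Option String :=
  let idx := PySem.Str.find stderr "py_compile.PyCompileError:"
  if idx = -1 then none
  else
    -- stderr[idx + len(marker):].partition("\n"), ported as one single split on "\n"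
    let after := PySem.Str.slice stderr (some (idx + PySem.Str.len "py_compile.PyCompileError:")) none
    let parts := (PySem.Str.splitMax? after "\n" 1).getD []   -- sep "\n" ≠ "": never none
    let head := (PySem.List.pyGet? parts 0).getD ""
    let rest := if parts.length = 2 then (PySem.List.pyGet? parts 1).getD "" else ""
    let extracted := PySem.Str.strip head
    let tail := PySem.Str.strip rest
    some (if extracted ≠ "" then extracted ++ "\n" ++ tail else tail)

-- ===== PRECONDITION & SPEC =====
def Spec_parse_python_compile_error_message (stderr : String) (out : Option String) : Prop := out = parse_python_compile_error_message_alt stderr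
instance (stderr : String) (out : Option String) : Decidable (Spec_parse_python_compile_error_message stderr out) := by unfold Spec_parse_python_compile_error_message; infer_instance

-- ===== CLAIM (what is proved, stated in full; the proofs are below) =====
def Claim_equal_parse_python_compile_error_message : Prop := ∀ (stderr : String), Dom_parse_python_compile_error_message stderr → Spec_parse_python_compile_error_message stderr (parse_python_compile_error_message stderr)

-- ===== LEMMAS AND PROOFS =====

-- the marker, on the character level
def pvM : List Char := "py_compile.PyCompileError:".toList

lemma pvM_ne_nil : pvM ≠ [] := by decide

lemma pvM_no_nl : '\n' ∉ pvM := by decide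

-- ---------- facts about PySem.Chars.find ----------

lemma pv_find_go_shift (sub : List Char) (l : List Char) (k : Nat) :
    PySem.Chars.find.go sub l k =
      if PySem.Chars.find.go sub l 0 = -1 then -1 else k + PySem.Chars.find.go sub l 0 := by
  induction l generalizing k with
  | nil =>
    rw [PySem.Chars.find.go, PySem.Chars.find.go]
    by_cases h : sub.isEmpty <;> simp [h]
  | cons c rest ih =>
    rw [PySem.Chars.find.go]
    conv_rhs => rw [PySem.Chars.find.go]
    by_cases h : sub.isPrefixOf (c :: rest) <;> simp only [h, if_true]
    · simp
    · rw [ih (k+1), ih 1]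
      have h3 : (-1:Int) ≤ PySem.Chars.find.go sub rest 0 := by
        simpa [PySem.Chars.find] using PySem.Chars.neg_one_le_find rest sub
      by_cases h2 : PySem.Chars.find.go sub rest 0 = -1 <;> simp [h2]
      rw [if_neg (by omega)]
      ring

lemma pv_find_nil {sub : List Char} (h : sub ≠ []) : PySem.Chars.find [] sub = -1 := by
  rw [PySem.Chars.find, PySem.Chars.find.go]
  simp [List.isEmpty_iff, h]

lemma pv_find_cons_pos {sub : List Char} {c : Char} {rest : List Char}
    (h : sub.isPrefixOf (c :: rest) = true) : PySem.Chars.find (c :: rest) sub = 0 := by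
  rw [PySem.Chars.find, PySem.Chars.find.go]
  simp [h]

lemma pv_find_cons_neg {sub : List Char} {c : Char} {rest : List Char}
    (h : sub.isPrefixOf (c :: rest) = false) :
    PySem.Chars.find (c :: rest) sub =
      if PySem.Chars.find rest sub = -1 then -1 else 1 + PySem.Chars.find rest sub := by
  rw [PySem.Chars.find, PySem.Chars.find.go]
  simp only [h, Bool.false_eq_true, if_false]
  rw [pv_find_go_shift sub rest 1]
  rfl

-- find = j as soon as sub is a prefix at j and at no earlier position
lemma pv_find_eq_of {s sub : List Char} {j : Nat}
    (h1 : sub <+: s.drop j) (h2 : ∀ i < j, ¬ sub <+: s.drop i) :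
    PySem.Chars.find s sub = j := by
  have hin : PySem.Chars.isIn sub s = true :=
    (PySem.Chars.exists_prefix_drop_iff_isIn sub s).mp ⟨j, h1⟩
  have hnn : 0 ≤ PySem.Chars.find s sub :=
    (PySem.Chars.find_nonneg_iff s sub).mpr ((PySem.Chars.isIn_iff_infix sub s).mp hin)
  obtain ⟨hpre, hmin⟩ := PySem.Chars.find_spec hnn
  have : (PySem.Chars.find s sub).toNat = j := by
    rcases lt_trichotomy (PySem.Chars.find s sub).toNat j with h | h | h
    · exact absurd hpre (h2 _ h)
    · exact h
    · exact absurd h1 (hmin j h)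
  omega

lemma pv_find_single_none {a : Char} {u : List Char} (h : a ∉ u) :
    PySem.Chars.find u [a] = -1 := by
  rw [PySem.Chars.find_eq_neg_one_iff, List.singleton_infix_iff]
  exact h

lemma pv_find_single_mid {a : Char} {u t : List Char} (h : a ∉ u) :
    PySem.Chars.find (u ++ a :: t) [a] = u.length := by
  apply pv_find_eq_of
  · rw [List.drop_left]
    exact ⟨t, rfl⟩
  · intro i hi hpre
    have hd : (u ++ a :: t).drop i = u.drop i ++ a :: t := by
      rw [List.drop_append_of_le_length (by omega)]
    rw [hd] at hpre
    have : u.drop i ≠ [] := by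
      intro hnil
      rw [List.drop_eq_nil_iff] at hnil
      omega
    obtain ⟨b, v, hbv⟩ := List.exists_cons_of_ne_nil this
    rw [hbv] at hpre
    have hb : b = a := by
      obtain ⟨w, hw⟩ := hpre
      simpa using congrArg (·.head?) hw.symm
    apply h
    have : b ∈ u.drop i := by rw [hbv]; exact List.mem_cons_self
    exact List.mem_of_mem_drop (hb ▸ this)

lemma pv_drop_big {l t : List Char} {j : Nat} (hj : l.length + 1 ≤ j) :
    (l ++ '\n' :: t).drop j = t.drop (j - l.length - 1) := by
  have e : j = l.length + (j - l.length) := by omega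
  rw [e, ← List.drop_drop, List.drop_left]
  have e2 : j - l.length = (j - l.length - 1) + 1 := by omega
  rw [e2, List.drop_succ_cons]
  congr 1
  omega

-- an occurrence of a newline-free pattern in `l ++ '\n' :: t` lies inside l or inside t
lemma pv_no_straddle {sub l t : List Char} {j : Nat}
    (hnl : '\n' ∉ sub) (h : sub <+: (l ++ '\n' :: t).drop j) :
    (j + sub.length ≤ l.length ∧ sub <+: l.drop j) ∨
      (l.length + 1 ≤ j ∧ sub <+: t.drop (j - l.length - 1)) := by
  by_cases hj : l.length + 1 ≤ j
  · right
    exact ⟨hj, by rwa [pv_drop_big hj] at h⟩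
  · left
    have hjl : j ≤ l.length := by omega
    by_cases hfit : j + sub.length ≤ l.length
    · refine ⟨hfit, ?_⟩
      rw [List.drop_append_of_le_length hjl] at h
      rw [List.prefix_iff_eq_take] at h ⊢
      conv_lhs => rw [h]
      rw [List.take_append_of_le_length (by simp; omega)]
    · exfalso
      -- the occurrence would cover position l.length, which holds '\n' ∉ sub
      have hlen : sub.length ≤ ((l ++ '\n' :: t).drop j).length := h.length_le
      have hidx : l.length - j < sub.length := by
        simp at hlen; omega
      have h1 : sub[l.length - j]'hidx = '\n' := by
        rw [h.getElem hidx, List.getElem_drop]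
        have : j + (l.length - j) = l.length := by omega
        simp only [this]
        rw [List.getElem_append_right (le_refl _)]
        simp
      exact hnl (h1 ▸ List.getElem_mem hidx)

lemma pv_infix_of_prefix_drop {sub l : List Char} {i : Nat} (h : sub <+: l.drop i) :
    sub <:+: l :=
  h.isInfix.trans (List.drop_suffix i l).isInfix

lemma pv_find_append_left {sub l t : List Char} (hnl : '\n' ∉ sub)
    (h : sub <:+: l) :
    PySem.Chars.find (l ++ '\n' :: t) sub = PySem.Chars.find l sub := by
  have hnn : 0 ≤ PySem.Chars.find l sub := (PySem.Chars.find_nonneg_iff l sub).mpr h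
  obtain ⟨hpre, hmin⟩ := PySem.Chars.find_spec hnn
  set i := (PySem.Chars.find l sub).toNat with hi
  have hil : i ≤ l.length := by
    have := PySem.Chars.find_le_length l sub
    omega
  have : PySem.Chars.find (l ++ '\n' :: t) sub = i := by
    apply pv_find_eq_of
    · rw [List.drop_append_of_le_length hil]
      exact hpre.trans (List.prefix_append _ _)
    · intro i' hi' hp
      rcases pv_no_straddle hnl hp with ⟨_, hp1⟩ | ⟨hge, _⟩
      · exact hmin i' hi' hp1
      · omega
  omega

lemma pv_find_append_right {sub l t : List Char} (hnl : '\n' ∉ sub)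
    (h : ¬ sub <:+: l) (h2 : sub <:+: t) :
    PySem.Chars.find (l ++ '\n' :: t) sub = (l.length : Int) + 1 + PySem.Chars.find t sub := by
  have hnn : 0 ≤ PySem.Chars.find t sub := (PySem.Chars.find_nonneg_iff t sub).mpr h2
  obtain ⟨hpre, hmin⟩ := PySem.Chars.find_spec hnn
  set f := (PySem.Chars.find t sub).toNat with hf
  have : PySem.Chars.find (l ++ '\n' :: t) sub = (l.length + 1 + f : Nat) := by
    apply pv_find_eq_of
    · rw [pv_drop_big (by omega)]
      have : l.length + 1 + f - l.length - 1 = f := by omega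
      rw [this]
      exact hpre
    · intro i' hi' hp
      rcases pv_no_straddle hnl hp with ⟨_, hp1⟩ | ⟨hge, hp2⟩
      · exact h (pv_infix_of_prefix_drop hp1)
      · exact hmin _ (by omega) hp2
  rw [this]
  push_cast
  omega

lemma pv_find_append_none {sub l t : List Char} (hnl : '\n' ∉ sub)
    (h : ¬ sub <:+: l) (h2 : ¬ sub <:+: t) :
    PySem.Chars.find (l ++ '\n' :: t) sub = -1 := by
  rw [PySem.Chars.find_eq_neg_one_iff]
  intro hinf
  obtain ⟨j, hj⟩ := (PySem.Chars.exists_prefix_drop_iff_isIn sub _).mpr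
    ((PySem.Chars.isIn_iff_infix sub _).mpr hinf)
  rcases pv_no_straddle hnl hj with ⟨_, hp1⟩ | ⟨_, hp2⟩
  · exact h (pv_infix_of_prefix_drop hp1)
  · exact h2 (pv_infix_of_prefix_drop hp2)

-- ---------- split(s, sep, 1) characterised by find ----------

lemma pv_go_zero (sep : List Char) (fuel : Nat) (l cur : List Char) (acc : List (List Char)) :
    PySem.Chars.splitOnMax.go sep fuel 0 l cur acc = ((cur.reverse ++ l) :: acc).reverse := by
  cases fuel with
  | zero => rw [PySem.Chars.splitOnMax.go]
  | succ f =>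
    cases l with
    | nil => rw [PySem.Chars.splitOnMax.go]; simp; omega
    | cons c rest => rw [PySem.Chars.splitOnMax.go]; simp

lemma pv_go_one {sep : List Char} (hsep : sep ≠ []) :
    ∀ (fuel : Nat) (l cur : List Char) (acc : List (List Char)), l.length ≤ fuel →
    PySem.Chars.splitOnMax.go sep fuel 1 l cur acc =
      acc.reverse ++
        (if PySem.Chars.find l sep = -1 then [cur.reverse ++ l]
         else [cur.reverse ++ l.take (PySem.Chars.find l sep).toNat,
               l.drop ((PySem.Chars.find l sep).toNat + sep.length)]) := by
  intro fuel
  induction fuel with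
  | zero =>
    intro l cur acc h
    have : l = [] := by
      cases l with
      | nil => rfl
      | cons a b => simp at h
    subst this
    rw [PySem.Chars.splitOnMax.go]
    rw [pv_find_nil hsep]
    simp
  | succ f ih =>
    intro l cur acc h
    cases l with
    | nil =>
      rw [PySem.Chars.splitOnMax.go, pv_find_nil hsep]
      simp
      omega
    | cons c rest =>
      rw [PySem.Chars.splitOnMax.go]
      simp only [if_false, one_ne_zero]
      by_cases hp : sep.isPrefixOf (c :: rest) = true
      · simp only [hp, if_true]
        rw [pv_go_zero, pv_find_cons_pos hp]
        simp
      · simp only [hp, if_false, Bool.false_eq_true]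
        rw [ih rest (c :: cur) acc (by simp at h; omega)]
        rw [pv_find_cons_neg (Bool.not_eq_true _ ▸ hp)]
        by_cases hr : PySem.Chars.find rest sep = -1
        · simp [hr]
        · have hge : 0 ≤ PySem.Chars.find rest sep := by
            have := PySem.Chars.neg_one_le_find rest sep
            omega
          have hne : ¬ (1 + PySem.Chars.find rest sep = -1) := by omega
          simp only [hr, if_false, hne]
          have ht : (1 + PySem.Chars.find rest sep).toNat
              = (PySem.Chars.find rest sep).toNat + 1 := by omega
          rw [ht]
          rw [List.take_succ_cons]
          rw [show (PySem.Chars.find rest sep).toNat + 1 + sep.length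
                = ((PySem.Chars.find rest sep).toNat + sep.length) + 1 from by omega]
          rw [List.drop_succ_cons]
          simp

lemma pv_splitOnMax_one {sep : List Char} (hsep : sep ≠ []) (s : List Char) :
    PySem.Chars.splitOnMax s sep 1 =
      if PySem.Chars.find s sep = -1 then [s]
      else [s.take (PySem.Chars.find s sep).toNat,
            s.drop ((PySem.Chars.find s sep).toNat + sep.length)] := by
  rw [PySem.Chars.splitOnMax]
  rw [if_neg (by omega)]
  have : (1 : Int).toNat = 1 := rfl
  rw [this, pv_go_one hsep (s.length + 1) s [] [] (by omega)]
  simp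

-- ---------- PySem.Chars.splitOn with a one-character separator is Mathlib's List.splitOn ----------

lemma pv_splitOn_go (c : Char) :
    ∀ (fuel : Nat) (l cur : List Char) (acc : List (List Char)), l.length ≤ fuel →
    PySem.Chars.splitOn.go [c] fuel l cur acc =
      acc.reverse ++ (List.splitOnP (· == c) l).modifyHead (cur.reverse ++ ·) := by
  intro fuel
  induction fuel with
  | zero =>
    intro l cur acc h
    have hl : l = [] := by cases l with | nil => rfl | cons a b => simp at h
    subst hl
    rw [PySem.Chars.splitOn.go]
    simp [List.splitOnP_nil]
  | succ f ih =>
    intro l cur acc h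
    cases l with
    | nil =>
      rw [PySem.Chars.splitOn.go]
      simp [List.splitOnP_nil]
      omega
    | cons a rest =>
      rw [PySem.Chars.splitOn.go]
      rw [List.splitOnP_cons]
      by_cases hac : a = c
      · have hp : [c].isPrefixOf (a :: rest) = true := by simp [List.isPrefixOf, hac]
        simp only [hp, if_true]
        rw [show List.drop [c].length (a :: rest) = rest from by simp]
        rw [ih rest [] (cur.reverse :: acc) (by simp at h; omega)]
        obtain ⟨y, ys, hy⟩ := List.exists_cons_of_ne_nil (List.splitOnP_ne_nil (· == c) rest)
        rw [hy]
        simp [hac]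
      · have hp : [c].isPrefixOf (a :: rest) = false := by
          simp [List.isPrefixOf]
          exact fun hh => hac hh.symm
        simp only [hp, Bool.false_eq_true, if_false]
        rw [ih rest (a :: cur) acc (by simp at h; omega)]
        have hpa : (a == c) = false := by simp only [beq_eq_false_iff_ne, ne_eq]; exact hac
        simp only [hpa, Bool.false_eq_true, if_false]
        obtain ⟨y, ys, hy⟩ := List.exists_cons_of_ne_nil (List.splitOnP_ne_nil (· == c) rest)
        rw [hy]
        simp

lemma pv_splitOn_single (s : List Char) (c : Char) :
    PySem.Chars.splitOn s [c] = List.splitOn c s := by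
  rw [PySem.Chars.splitOn]
  rw [pv_splitOn_go c (s.length + 1) s [] [] (by omega)]
  rw [List.splitOn]
  obtain ⟨y, ys, hy⟩ := List.exists_cons_of_ne_nil (List.splitOnP_ne_nil (· == c) s)
  rw [hy]
  simp

lemma pv_splitOnP_mem {p : Char → Bool} {l piece : List Char}
    (h : piece ∈ List.splitOnP p l) : ∀ a ∈ piece, p a = false := by
  induction l generalizing piece with
  | nil =>
    rw [List.splitOnP_nil] at h
    simp at h
    subst h
    simp
  | cons b rest ih =>
    rw [List.splitOnP_cons] at h
    by_cases hb : p b = true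
    · simp only [hb, if_true] at h
      rcases List.mem_cons.mp h with h1 | h1
      · subst h1; simp
      · exact ih h1
    · simp only [hb, if_false, Bool.false_eq_true] at h
      obtain ⟨y, ys, hy⟩ := List.exists_cons_of_ne_nil (List.splitOnP_ne_nil p rest)
      rw [hy, List.modifyHead_cons] at h
      rcases List.mem_cons.mp h with h1 | h1
      · subst h1
        intro x hx
        rcases List.mem_cons.mp hx with h2 | h2
        · subst h2; simpa using hb
        · exact ih (hy ▸ List.mem_cons_self) x h2
      · exact ih (hy ▸ List.mem_cons_of_mem _ h1)

-- ---------- character-level restatements of the two ports ----------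

def pvCharA : List (List Char) → Option (List Char)
  | [] => none
  | line :: rest =>
    if PySem.Chars.isIn pvM line then
      let parts := PySem.Chars.splitOnMax line pvM 1
      let extracted := PySem.Chars.strip ((PySem.List.pyGet? parts 1).getD [])
      let tail := PySem.Chars.strip (PySem.Chars.join ['\n'] rest)
      some (if extracted ≠ [] then extracted ++ '\n' :: tail else tail)
    else pvCharA rest

def pvCharBtail (after : List Char) : List Char :=
  let parts := PySem.Chars.splitOnMax after ['\n'] 1
  let head := (PySem.List.pyGet? parts 0).getD []
  let rest := if parts.length = 2 then (PySem.List.pyGet? parts 1).getD [] else []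
  let extracted := PySem.Chars.strip head
  let tail := PySem.Chars.strip rest
  if extracted ≠ [] then extracted ++ '\n' :: tail else tail

def pvCharB (s : List Char) : Option (List Char) :=
  let idx := PySem.Chars.find s pvM
  if idx = -1 then none
  else some (pvCharBtail (PySem.List.slice s (some (idx + (pvM.length : Int))) none))

lemma pv_pyGet?_map {α β : Type} (f : α → β) (xs : List α) (i : Int) :
    PySem.List.pyGet? (xs.map f) i = Option.map f (PySem.List.pyGet? xs i) := by
  rw [PySem.List.pyGet?, PySem.List.pyGet?, List.length_map]
  cases PySem.List.pyIdx? xs.length i with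
  | none => rfl
  | some k => simp

lemma pv_ofList_ne_empty (l : List Char) : (String.ofList l ≠ "") ↔ l ≠ [] := by
  constructor
  · intro h hl; exact h (by simp [hl])
  · intro h he
    apply h
    have := congrArg String.toList he
    simpa using this

lemma pv_A_bridge (ls : List String) :
    Option.map String.toList (pvLoopA ls) = pvCharA (ls.map String.toList) := by
  induction ls with
  | nil => rfl
  | cons line rest ih =>
    rw [pvLoopA, List.map_cons, pvCharA]
    by_cases hc : PySem.Chars.isIn pvM line.toList
    · have hc' : PySem.Str.isIn "py_compile.PyCompileError:" line = true := hc
      simp only [hc, hc', if_true]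
      have hsplit : PySem.Str.splitMax? line "py_compile.PyCompileError:" 1
          = some ((PySem.Chars.splitOnMax line.toList pvM 1).map String.ofList) := by
        rw [PySem.Str.splitMax?, PySem.Chars.splitMax?]
        rw [if_neg (by
          simp [show ("py_compile.PyCompileError:" : String).toList = pvM from rfl]
          exact pvM_ne_nil)]
        rfl
      rw [hsplit]
      rw [Option.getD_some]
      rw [pv_pyGet?_map]
      have hgetD : ∀ (o : Option (List Char)),
          (Option.map String.ofList o).getD "" = String.ofList (o.getD []) := by
        intro o; cases o <;> rfl
      rw [hgetD]
      have hstrip : ∀ (l : List Char),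
          PySem.Str.strip (String.ofList l) = String.ofList (PySem.Chars.strip l) := by
        intro l; rw [PySem.Str.strip]; simp
      rw [hstrip]
      have hjoin : PySem.Str.join "\n" rest
          = String.ofList (PySem.Chars.join ['\n'] (rest.map String.toList)) := rfl
      rw [hjoin, hstrip]
      simp only [pv_ofList_ne_empty]
      split_ifs with h1
      · simp [String.toList_append]
      · simp
    · have hc' : PySem.Str.isIn "py_compile.PyCompileError:" line = false := by
        simpa using hc
      simp only [hc, hc', if_false, Bool.false_eq_true]
      exact ih

lemma pv_B_bridge (stderr : String) :
    Option.map String.toList (parse_python_compile_error_message_alt stderr) =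
      pvCharB stderr.toList := by
  rw [parse_python_compile_error_message_alt, pvCharB]
  have hfind : PySem.Str.find stderr "py_compile.PyCompileError:"
      = PySem.Chars.find stderr.toList pvM := rfl
  by_cases h : PySem.Chars.find stderr.toList pvM = -1
  · simp only [hfind, h]
    rfl
  · simp only [hfind, if_neg h]
    have hafter : (PySem.Str.slice stderr
        (some (PySem.Chars.find stderr.toList pvM + PySem.Str.len "py_compile.PyCompileError:")) none).toList
        = PySem.List.slice stderr.toList
            (some (PySem.Chars.find stderr.toList pvM + (pvM.length : Int))) none := by
      rw [PySem.Str.toList_slice, PySem.Chars.slice_eq_listSlice]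
      rfl
    set after := PySem.Str.slice stderr
      (some (PySem.Chars.find stderr.toList pvM + PySem.Str.len "py_compile.PyCompileError:")) none with hA
    rw [pvCharBtail]
    rw [← hafter]
    have hsplit : PySem.Str.splitMax? after "\n" 1
        = some ((PySem.Chars.splitOnMax after.toList ['\n'] 1).map String.ofList) := by
      rw [PySem.Str.splitMax?, PySem.Chars.splitMax?]
      rw [if_neg (by simp)]
      rfl
    rw [hsplit, Option.getD_some]
    rw [pv_pyGet?_map, pv_pyGet?_map, List.length_map]
    have hgetD : ∀ (o : Option (List Char)),
        (Option.map String.ofList o).getD "" = String.ofList (o.getD []) := by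
      intro o; cases o <;> rfl
    rw [hgetD]
    have hstrip : ∀ (l : List Char),
        PySem.Str.strip (String.ofList l) = String.ofList (PySem.Chars.strip l) := by
      intro l; rw [PySem.Str.strip]; simp
    rw [hstrip]
    have hrest : (if (PySem.Chars.splitOnMax after.toList ['\n'] 1).length = 2
          then (Option.map String.ofList
            (PySem.List.pyGet? (PySem.Chars.splitOnMax after.toList ['\n'] 1) 1)).getD ""
          else "")
        = String.ofList (if (PySem.Chars.splitOnMax after.toList ['\n'] 1).length = 2
          then (PySem.List.pyGet? (PySem.Chars.splitOnMax after.toList ['\n'] 1) 1).getD [] else []) := by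
      split_ifs
      · rw [hgetD]
      · rfl
    rw [hrest, hstrip]
    simp only [pv_ofList_ne_empty]
    split_ifs <;>
      simp only [Option.map_some, String.toList_append,
        String.toList_ofList, show ("\n" : String).toList = ['\n'] from rfl,
        List.append_assoc, List.singleton_append]

-- ---------- the main equivalence on the character level ----------

lemma pv_inter_nil : ['\n'].intercalate ([] : List (List Char)) = [] := rfl

lemma pv_inter_single (x : List Char) : ['\n'].intercalate [x] = x := by
  simp [List.intercalate]

lemma pv_inter_cons2 (x y : List Char) (zs : List (List Char)) :
    ['\n'].intercalate (x :: y :: zs) = x ++ '\n' :: ['\n'].intercalate (y :: zs) := by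
  simp [List.intercalate, List.intersperse]

lemma pv_pyGet?_pair0 {α : Type} (a b : α) : PySem.List.pyGet? [a, b] 0 = some a := rfl

lemma pv_pyGet?_pair1 {α : Type} (a b : α) : PySem.List.pyGet? [a, b] 1 = some b := rfl

lemma pv_pyGet?_one0 {α : Type} (a : α) : PySem.List.pyGet? [a] 0 = some a := rfl

-- B's value once the marker's line still has a following newline
lemma pv_Btail_mid {u t : List Char} (hu : '\n' ∉ u) :
    pvCharBtail (u ++ '\n' :: t) =
      (if PySem.Chars.strip u ≠ [] then PySem.Chars.strip u ++ '\n' :: PySem.Chars.strip t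
       else PySem.Chars.strip t) := by
  simp only [pvCharBtail]
  rw [pv_splitOnMax_one (by simp) (u ++ '\n' :: t)]
  rw [pv_find_single_mid hu]
  rw [if_neg (show ¬((u.length : Int) = -1) by omega)]
  have h1 : ((u.length : Int)).toNat = u.length := by omega
  rw [h1, List.take_left]
  have h2 : (u ++ '\n' :: t).drop (u.length + ['\n'].length) = t := by
    rw [pv_drop_big (by simp)]
    simp
  rw [h2]
  simp only [pv_pyGet?_pair0, pv_pyGet?_pair1, Option.getD_some, List.length_cons,
    List.length_nil]
  simp

-- B's value when the marker sits on the last line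
lemma pv_Btail_last {u : List Char} (hu : '\n' ∉ u) :
    pvCharBtail u =
      (if PySem.Chars.strip u ≠ [] then PySem.Chars.strip u ++ '\n' :: PySem.Chars.strip []
       else PySem.Chars.strip []) := by
  simp only [pvCharBtail]
  rw [pv_splitOnMax_one (by simp) u]
  rw [if_pos (pv_find_single_none hu)]
  simp only [pv_pyGet?_one0, Option.getD_some, List.length_cons, List.length_nil]
  norm_num

lemma pv_main : ∀ (L : List (List Char)), (∀ l ∈ L, '\n' ∉ l) →
    pvCharA L = pvCharB (['\n'].intercalate L) := by
  intro L
  induction L with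
  | nil =>
    intro _
    rw [pvCharA]
    simp only [pvCharB, pv_inter_nil]
    rw [if_pos (pv_find_nil pvM_ne_nil)]
  | cons l rest ih =>
    intro hcl
    have hl : '\n' ∉ l := hcl l List.mem_cons_self
    have hrestcl : ∀ x ∈ rest, '\n' ∉ x := fun x hx => hcl x (List.mem_cons_of_mem _ hx)
    simp only [pvCharA]
    by_cases hi : PySem.Chars.isIn pvM l
    · simp only [hi, if_true]
      have hinf : pvM <:+: l := (PySem.Chars.isIn_iff_infix _ _).mp hi
      have hnn : 0 ≤ PySem.Chars.find l pvM := (PySem.Chars.find_nonneg_iff _ _).mpr hinf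
      have hil : (PySem.Chars.find l pvM).toNat ≤ l.length := by
        have := PySem.Chars.find_le_length l pvM
        omega
      have hfit : (PySem.Chars.find l pvM).toNat + pvM.length ≤ l.length := by
        obtain ⟨hpre, -⟩ := PySem.Chars.find_spec hnn
        have := hpre.length_le
        simp at this
        omega
      set i := (PySem.Chars.find l pvM).toNat with hidef
      have hparts : PySem.Chars.splitOnMax l pvM 1
          = [l.take i, l.drop (i + pvM.length)] := by
        rw [pv_splitOnMax_one pvM_ne_nil l, if_neg (by omega)]
      rw [hparts, pv_pyGet?_pair1, Option.getD_some]
      set u := l.drop (i + pvM.length) with hudef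
      have hu : '\n' ∉ u := fun hm => hl (List.mem_of_mem_drop hm)
      cases rest with
      | nil =>
        simp only [pvCharB, pv_inter_single]
        rw [if_neg (show ¬(PySem.Chars.find l pvM = -1) by omega)]
        have hslice : PySem.List.slice l (some (PySem.Chars.find l pvM + (pvM.length : Int))) none
            = u := by
          rw [PySem.List.slice_from l (by omega)]
          rw [hudef]
          congr 1
          omega
        rw [hslice, pv_Btail_last hu]
        rfl
      | cons r rs =>
        rw [pv_inter_cons2]
        set T := ['\n'].intercalate (r :: rs) with hTdef
        simp only [pvCharB]
        rw [pv_find_append_left pvM_no_nl hinf]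
        rw [if_neg (show ¬(PySem.Chars.find l pvM = -1) by omega)]
        have hslice : PySem.List.slice (l ++ '\n' :: T)
            (some (PySem.Chars.find l pvM + (pvM.length : Int))) none = u ++ '\n' :: T := by
          rw [PySem.List.slice_from _ (by omega)]
          have : (PySem.Chars.find l pvM + (pvM.length : Int)).toNat = i + pvM.length := by omega
          rw [this, List.drop_append_of_le_length hfit]
        rw [hslice, pv_Btail_mid hu]
        have hjoin : PySem.Chars.join ['\n'] (r :: rs) = T := rfl
        rw [hjoin]
    · simp only [hi, if_false, Bool.false_eq_true]
      have hninf : ¬ pvM <:+: l := fun h => hi ((PySem.Chars.isIn_iff_infix _ _).mpr h)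
      rw [ih hrestcl]
      cases rest with
      | nil =>
        simp only [pv_inter_single, pv_inter_nil]
        simp only [pvCharB]
        rw [if_pos (pv_find_nil pvM_ne_nil)]
        rw [if_pos (by rw [PySem.Chars.find_eq_neg_one_iff]; exact hninf)]
      | cons r rs =>
        rw [pv_inter_cons2]
        set T := ['\n'].intercalate (r :: rs) with hTdef
        by_cases h2 : pvM <:+: T
        · have hf2 : 0 ≤ PySem.Chars.find T pvM := (PySem.Chars.find_nonneg_iff _ _).mpr h2
          simp only [pvCharB]
          rw [pv_find_append_right pvM_no_nl hninf h2]
          rw [if_neg (show ¬((l.length : Int) + 1 + PySem.Chars.find T pvM = -1) by omega),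
              if_neg (show ¬(PySem.Chars.find T pvM = -1) by omega)]
          congr 1
          have e1 : PySem.List.slice (l ++ '\n' :: T)
              (some ((l.length : Int) + 1 + PySem.Chars.find T pvM + (pvM.length : Int))) none
              = List.drop (((l.length : Int) + 1 + PySem.Chars.find T pvM + (pvM.length : Int)).toNat)
                  (l ++ '\n' :: T) :=
            PySem.List.slice_from _ (by omega)
          have e2 : PySem.List.slice T (some (PySem.Chars.find T pvM + (pvM.length : Int))) none
              = List.drop ((PySem.Chars.find T pvM + (pvM.length : Int)).toNat) T :=
            PySem.List.slice_from _ (by omega)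
          rw [e1, e2]
          rw [show ((l.length : Int) + 1 + PySem.Chars.find T pvM + (pvM.length : Int)).toNat
              = l.length + 1 + ((PySem.Chars.find T pvM + (pvM.length : Int)).toNat) from by omega]
          rw [pv_drop_big (by omega)]
          congr 1
          congr 1
          omega
        · simp only [pvCharB]
          rw [if_pos (pv_find_append_none pvM_no_nl hninf h2)]
          rw [if_pos (by rw [PySem.Chars.find_eq_neg_one_iff]; exact h2)]

-- ---------- assembly ----------

lemma pv_opt_toList_inj {o1 o2 : Option String}
    (h : Option.map String.toList o1 = Option.map String.toList o2) : o1 = o2 := by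
  cases o1 <;> cases o2 <;> simp_all
  exact String.toList_inj.mp h

lemma pv_lines (stderr : String) :
    ((PySem.Str.split? stderr "\n").getD []).map String.toList
      = List.splitOn '\n' stderr.toList := by
  rw [PySem.Str.split?, PySem.Chars.split?]
  rw [if_neg (by simp)]
  rw [Option.map_some, Option.getD_some]
  rw [List.map_map]
  rw [show ("\n" : String).toList = ['\n'] from rfl, pv_splitOn_single]
  have : String.toList ∘ String.ofList = id := by
    funext l; simp
  rw [this, List.map_id]

lemma pv_clean (stderr : String) :
    ∀ l ∈ List.splitOn '\n' stderr.toList, '\n' ∉ l := by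
  intro l hl hm
  have := pv_splitOnP_mem (by rw [List.splitOn] at hl; exact hl) '\n' hm
  simp at this

-- ===== VERDICT (by name: the statement is the Claim_ definition above) =====
theorem parse_python_compile_error_message_spec : Claim_equal_parse_python_compile_error_message := by
  intro stderr _
  unfold Spec_parse_python_compile_error_message
  apply pv_opt_toList_inj
  rw [pv_B_bridge]
  rw [parse_python_compile_error_message]
  rw [pv_A_bridge, pv_lines]
  rw [pv_main _ (pv_clean stderr)]
  rw [List.intercalate_splitOn]
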